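-- pv_equiv track=rewrite | github.com/vara66034-sudo/EventMind | backend/app/services/recommendations/service.py | _extract_event_tags
-- ===== SOURCE A (Python) =====
-- from typing import List, Dict, Optional
--
-- def _extract_event_tags(event: Dict) -> List[str]:
--     raw_tags = event.get('tags') or []
--
--     if isinstance(raw_tags, str):
--         raw_tags = [tag.strip() for tag in raw_tags.split(',') if tag.strip()]
--
--     tags = list(raw_tags)
--
--     text = f"{event.get('name', '')} {event.get('description', '')}".lower()
--
--     keyword_map = {
--         'python': 'Backend',
--         'backend': 'Backend',
--         'django': 'Backend',
--         'fastapi': 'Backend',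
--         'frontend': 'Frontend',
--         'react': 'Frontend',
--         'javascript': 'Frontend',
--         'ml': 'ML',
--         'machine learning': 'ML',
--         'машинное обучение': 'ML',
--         'ai': 'AI',
--         'gpt': 'AI',
--         'нейросет': 'AI',
--         'искусственный интеллект': 'AI',
--         'data': 'Data Science',
--         'данн': 'Data Science',
--         'devops': 'DevOps',
--         'docker': 'DevOps',
--         'kubernetes': 'DevOps',
--         'mobile': 'Mobile',
--         'android': 'Mobile',
--         'ios': 'Mobile',
--         'security': 'CyberSecurity',
--         'cyber': 'CyberSecurity',
--         'кибер': 'CyberSecurity',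
--         'конференц': 'Конференция',
--         'митап': 'Митап',
--         'meetup': 'Митап',
--         'хакатон': 'Хакатон',
--         'hackathon': 'Хакатон',
--         'воркшоп': 'Воркшоп',
--         'workshop': 'Воркшоп',
--         'it': 'IT',
--     }
--
--     for keyword, tag in keyword_map.items():
--         if keyword in text and tag not in tags:
--             tags.append(tag)
--
--     return tags
-- ===== SOURCE B (Python) =====
-- from typing import List, Dict
--
-- def _extract_event_tags(event: Dict) -> List[str]:
--     raw_tags = event.get('tags') or []
--
--     if isinstance(raw_tags, str):
--         raw_tags = [tag.strip() for tag in raw_tags.split(',') if tag.strip()]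
--
--     tags = list(raw_tags)
--
--     text = f"{event.get('name', '')} {event.get('description', '')}".lower()
--
--     # category -> its trigger keywords, in first-appearance order
--     groups = [
--         ('Backend', ['python', 'backend', 'django', 'fastapi']),
--         ('Frontend', ['frontend', 'react', 'javascript']),
--         ('ML', ['ml', 'machine learning', 'машинное обучение']),
--         ('AI', ['ai', 'gpt', 'нейросет', 'искусственный интеллект']),
--         ('Data Science', ['data', 'данн']),
--         ('DevOps', ['devops', 'docker', 'kubernetes']),
--         ('Mobile', ['mobile', 'android', 'ios']),
--         ('CyberSecurity', ['security', 'cyber', 'кибер']),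
--         ('Конференция', ['конференц']),
--         ('Митап', ['митап', 'meetup']),
--         ('Хакатон', ['хакатон', 'hackathon']),
--         ('Воркшоп', ['воркшоп', 'workshop']),
--         ('IT', ['it']),
--     ]
--
--     for tag, keywords in groups:
--         if tag not in tags and any(keyword in text for keyword in keywords):
--             tags.append(tag)
--
--     return tags
-- ===== Notes on version B (the rewrite author's own statement) =====
-- stated objective: alternative
-- what changed: Replaces the flat keyword->tag map scan with a grouped category->keywords table iterated per category with an inner any(), preserving A's append order because A's same-tag keywords are contiguous.
import Mathlib
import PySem

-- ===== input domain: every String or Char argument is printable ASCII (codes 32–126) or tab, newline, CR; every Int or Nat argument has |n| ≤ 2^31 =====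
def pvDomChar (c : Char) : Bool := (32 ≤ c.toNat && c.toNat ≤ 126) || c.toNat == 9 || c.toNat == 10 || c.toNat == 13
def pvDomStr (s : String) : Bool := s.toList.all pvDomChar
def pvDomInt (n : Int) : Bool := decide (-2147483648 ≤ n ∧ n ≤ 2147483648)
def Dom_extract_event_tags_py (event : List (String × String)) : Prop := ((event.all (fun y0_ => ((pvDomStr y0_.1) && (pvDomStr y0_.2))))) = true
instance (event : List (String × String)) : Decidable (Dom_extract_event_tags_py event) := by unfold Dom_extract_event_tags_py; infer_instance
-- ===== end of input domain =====

-- B replaces A's flat keyword->tag scan by a grouped category->keywords table with an inner any(); same cost, different traversal.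


-- ===== PORT A =====
-- event.get(k): association-list lookup, first match (dict convention)
def pvGet (event : List (String × String)) (k : String) : Option String :=
  (event.find? (fun p => p.1 == k)).map (·.2)

-- raw_tags = event.get('tags') or []; if str: [tag.strip() for tag in raw_tags.split(',') if tag.strip()]
def pvRawTags (event : List (String × String)) : List String :=
  match pvGet event "tags" with
  | none => []
  | some s =>
    if s = "" then []   -- '' is falsy: `or []`
    else (((PySem.Str.split? s ",").getD []).map PySem.Str.strip).filter (fun t => t ≠ "")

-- text = f"{event.get('name','')} {event.get('description','')}".lower()
def pvText (event : List (String × String)) : String :=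
  PySem.Str.lower (((pvGet event "name").getD "") ++ " " ++ ((pvGet event "description").getD ""))

def pvKeywordMap : List (String × String) :=
  [("python", "Backend"), ("backend", "Backend"), ("django", "Backend"), ("fastapi", "Backend"),
   ("frontend", "Frontend"), ("react", "Frontend"), ("javascript", "Frontend"),
   ("ml", "ML"), ("machine learning", "ML"), ("машинное обучение", "ML"),
   ("ai", "AI"), ("gpt", "AI"), ("нейросет", "AI"), ("искусственный интеллект", "AI"),
   ("data", "Data Science"), ("данн", "Data Science"),
   ("devops", "DevOps"), ("docker", "DevOps"), ("kubernetes", "DevOps"),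
   ("mobile", "Mobile"), ("android", "Mobile"), ("ios", "Mobile"),
   ("security", "CyberSecurity"), ("cyber", "CyberSecurity"), ("кибер", "CyberSecurity"),
   ("конференц", "Конференция"),
   ("митап", "Митап"), ("meetup", "Митап"),
   ("хакатон", "Хакатон"), ("hackathon", "Хакатон"),
   ("воркшоп", "Воркшоп"), ("workshop", "Воркшоп"),
   ("it", "IT")]

def extract_event_tags_py (event : List (String × String)) : List String :=
  let tags := pvRawTags event
  let text := pvText event
  pvKeywordMap.foldl
    (fun tags kt => if PySem.Str.isIn kt.1 text && !(tags.contains kt.2) then tags ++ [kt.2] else tags)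
    tags

-- ===== PORT B =====
def pvGroups : List (String × List String) :=
  [("Backend", ["python", "backend", "django", "fastapi"]),
   ("Frontend", ["frontend", "react", "javascript"]),
   ("ML", ["ml", "machine learning", "машинное обучение"]),
   ("AI", ["ai", "gpt", "нейросет", "искусственный интеллект"]),
   ("Data Science", ["data", "данн"]),
   ("DevOps", ["devops", "docker", "kubernetes"]),
   ("Mobile", ["mobile", "android", "ios"]),
   ("CyberSecurity", ["security", "cyber", "кибер"]),
   ("Конференция", ["конференц"]),
   ("Митап", ["митап", "meetup"]),
   ("Хакатон", ["хакатон", "hackathon"]),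
   ("Воркшоп", ["воркшоп", "workshop"]),
   ("IT", ["it"])]

def extract_event_tags_py_alt (event : List (String × String)) : List String :=
  let tags := pvRawTags event
  let text := pvText event
  pvGroups.foldl
    (fun tags g =>
      if !(tags.contains g.1) && g.2.any (fun k => PySem.Str.isIn k text) then tags ++ [g.1] else tags)
    tags

-- ===== PRECONDITION & SPEC =====
def Spec_extract_event_tags_py (event : List (String × String)) (out : List String) : Prop := out = extract_event_tags_py_alt event
instance (event : List (String × String)) (out : List String) : Decidable (Spec_extract_event_tags_py event out) := by unfold Spec_extract_event_tags_py; infer_instance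

-- ===== CLAIM (what is proved, stated in full; the proofs are below) =====
def Claim_equal_extract_event_tags_py : Prop := ∀ (event : List (String × String)), Dom_extract_event_tags_py event → Spec_extract_event_tags_py event (extract_event_tags_py event)

-- ===== LEMMAS AND PROOFS =====

-- once the tag is in the list, A's loop over that tag's keywords changes nothing
lemma foldl_skip_of_contains (text : String) (t : String) (kws : List String) (tags : List String)
    (h : tags.contains t = true) :
    (kws.map (fun k => (k, t))).foldl
      (fun tags kt => if PySem.Str.isIn kt.1 text && !(tags.contains kt.2) then tags ++ [kt.2] else tags)
      tags = tags := by
  induction kws with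
  | nil => rfl
  | cons k ks ih =>
    simp only [List.map_cons, List.foldl_cons, h, Bool.not_true, Bool.and_false,
      Bool.false_eq_true, if_false, ih]

-- A's flat fold over one contiguous same-tag block equals B's single grouped step
lemma foldl_block (text : String) (t : String) (kws : List String) (tags : List String) :
    (kws.map (fun k => (k, t))).foldl
      (fun tags kt => if PySem.Str.isIn kt.1 text && !(tags.contains kt.2) then tags ++ [kt.2] else tags)
      tags
    = if !(tags.contains t) && kws.any (fun k => PySem.Str.isIn k text) then tags ++ [t] else tags := by
  induction kws generalizing tags with
  | nil =>
    simp only [List.map_nil, List.foldl_nil, List.any_nil, Bool.and_false, Bool.false_eq_true,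
      if_false]
  | cons k ks ih =>
    simp only [List.map_cons, List.foldl_cons, List.any_cons]
    by_cases hc : tags.contains t = true
    · simp only [hc, Bool.not_true, Bool.and_false, Bool.false_eq_true, if_false, Bool.false_and,
        foldl_skip_of_contains text t ks tags hc]
    · rw [Bool.not_eq_true] at hc
      by_cases hk : PySem.Str.isIn k text = true
      · have hmem : (tags ++ [t]).contains t = true := by simp
        simp only [hc, hk, Bool.not_false, Bool.and_true, if_true, Bool.true_or,
          foldl_skip_of_contains text t ks (tags ++ [t]) hmem]
      · rw [Bool.not_eq_true] at hk
        simp only [hc, hk, Bool.not_false, Bool.false_and, Bool.false_eq_true, if_false,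
          Bool.false_or, ih]

-- the flat fold over the concatenation of the blocks equals the grouped fold
lemma foldl_groups (text : String) (groups : List (String × List String)) (tags : List String) :
    (groups.flatMap (fun g => g.2.map (fun k => (k, g.1)))).foldl
      (fun tags kt => if PySem.Str.isIn kt.1 text && !(tags.contains kt.2) then tags ++ [kt.2] else tags)
      tags
    = groups.foldl
      (fun tags g =>
        if !(tags.contains g.1) && g.2.any (fun k => PySem.Str.isIn k text) then tags ++ [g.1] else tags)
      tags := by
  induction groups generalizing tags with
  | nil => rfl
  | cons g gs ih =>
    simp only [List.flatMap_cons, List.foldl_append, List.foldl_cons]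
    rw [foldl_block, ih]

lemma kwMap_eq_flat : pvKeywordMap = pvGroups.flatMap (fun g => g.2.map (fun k => (k, g.1))) := rfl

-- ===== VERDICT (by name: the statement is the Claim_ definition above) =====
theorem extract_event_tags_py_spec : Claim_equal_extract_event_tags_py := by
  intro event _
  show extract_event_tags_py event = extract_event_tags_py_alt event
  unfold extract_event_tags_py extract_event_tags_py_alt
  rw [kwMap_eq_flat, foldl_groups]
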